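-- pv_equiv track=rewrite | github.com/BudEcosystem/simulator | BudSimulator/src/optimization/hardware_optimizer.py | _generate_node_options
-- ===== SOURCE A (Python) =====
-- from typing import Dict, List, Optional, Tuple, Any
--
-- def _generate_node_options(min_nodes: int, max_nodes: int = 16) -> List[int]:
--     """Generate node count options to try"""
--     options = []
--     current = min_nodes
--
--     while current <= max_nodes:
--         options.append(current)
--         # Use powers of 2 for better network topology
--         if current < 2:
--             current = 2
--         elif current < 4:
--             current = 4
--         elif current < 8:
--             current = 8
--         else:
--             next_current = current * 2
--             if next_current > max_nodes:
--                 break  # Exit loop if we can't go higher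
--             current = next_current
--
--     return options
-- ===== SOURCE B (Python) =====
-- from typing import List
--
-- def _generate_node_options(min_nodes: int, max_nodes: int = 16) -> List[int]:
--     """Generate node count options: min_nodes, then its doubling chain in closed form."""
--     if min_nodes > max_nodes:
--         return []
--     # first value the loop over the chain would visit after min_nodes
--     start = 2 if min_nodes < 2 else 4 if min_nodes < 4 else 8 if min_nodes < 8 else 2 * min_nodes
--     if start > max_nodes:
--         return [min_nodes]
--     # start * 2**j <= max_nodes  iff  j < (max_nodes // start).bit_length()
--     k = (max_nodes // start).bit_length()
--     return [min_nodes] + [start << j for j in range(k)]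
-- ===== Notes on version B (the rewrite author's own statement) =====
-- stated objective: simpler
-- what changed: A's while loop with an in-loop <2/<4/<8 threshold cascade and an early break is replaced by computing the chain start once and emitting the doubling chain in closed form as start*2^j for j below (max_nodes // start).bit_length().
import Mathlib
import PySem

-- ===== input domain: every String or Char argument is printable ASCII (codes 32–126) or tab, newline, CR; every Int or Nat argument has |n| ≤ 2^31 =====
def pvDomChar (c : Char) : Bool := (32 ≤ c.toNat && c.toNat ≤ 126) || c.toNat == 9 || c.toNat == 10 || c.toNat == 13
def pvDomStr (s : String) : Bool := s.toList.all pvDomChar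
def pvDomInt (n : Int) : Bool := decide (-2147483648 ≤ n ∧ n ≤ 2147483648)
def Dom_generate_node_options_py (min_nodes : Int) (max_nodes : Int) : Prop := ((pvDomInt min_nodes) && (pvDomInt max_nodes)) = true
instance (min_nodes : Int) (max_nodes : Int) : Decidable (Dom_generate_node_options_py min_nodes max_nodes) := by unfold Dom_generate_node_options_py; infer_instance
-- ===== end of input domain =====

-- B replaces A's in-loop threshold/break state machine by a seed plus a closed-form doubling
-- chain start*2^j for j below a bit_length (objective: simpler).

-- ===== PORT A =====
-- A's while loop; state = (current, options), each branch in the Python's order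
def pyALoop (max_nodes current : Int) (options : List Int) : List Int :=
  if _h : current ≤ max_nodes then
    let options := options ++ [current]
    if current < 2 then pyALoop max_nodes 2 options
    else if current < 4 then pyALoop max_nodes 4 options
    else if current < 8 then pyALoop max_nodes 8 options
    else
      let next_current := current * 2
      if next_current > max_nodes then options
      else pyALoop max_nodes next_current options
  else options
termination_by (max_nodes + 1 - current).toNat
decreasing_by all_goals omega

def generate_node_options_py (min_nodes : Int) (max_nodes : Int) : List Int :=
  pyALoop max_nodes min_nodes []

-- ===== PORT B =====
def generate_node_options_py_alt (min_nodes : Int) (max_nodes : Int) : List Int :=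
  if min_nodes > max_nodes then []
  else
    let start : Int :=
      if min_nodes < 2 then 2 else if min_nodes < 4 then 4
      else if min_nodes < 8 then 8 else 2 * min_nodes
    if start > max_nodes then [min_nodes]
    else
      -- (max_nodes // start).bit_length(); PySem.Int.bitLength is Python's bit_length
      let k := PySem.Int.bitLength (PySem.Int.floordiv max_nodes start)
      -- start << j = start * 2 ^ j (exact: j ≥ 0)
      min_nodes :: (List.range k).map (fun j => start * 2 ^ j)

-- ===== PRECONDITION & SPEC =====
def Spec_generate_node_options_py (min_nodes : Int) (max_nodes : Int) (out : List Int) : Prop := out = generate_node_options_py_alt min_nodes max_nodes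
instance (min_nodes : Int) (max_nodes : Int) (out : List Int) : Decidable (Spec_generate_node_options_py min_nodes max_nodes out) := by unfold Spec_generate_node_options_py; infer_instance

-- ===== CLAIM (what is proved, stated in full; the proofs are below) =====
def Claim_equal_generate_node_options_py : Prop := ∀ (min_nodes : Int) (max_nodes : Int), Dom_generate_node_options_py min_nodes max_nodes → Spec_generate_node_options_py min_nodes max_nodes (generate_node_options_py min_nodes max_nodes)

-- ===== LEMMAS AND PROOFS =====

-- the accumulator only prefixes the loop's result
theorem pyALoop_acc (max_nodes : Int) (current : Int) (acc : List Int) :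
    pyALoop max_nodes current acc = acc ++ pyALoop max_nodes current [] := by
  induction hn : (max_nodes + 1 - current).toNat using Nat.strong_induction_on
    generalizing current acc with
  | _ n IH =>
  rw [pyALoop, pyALoop]
  simp only [List.nil_append]
  split_ifs with h1 h2 h3 h4 h5
  · rw [IH _ (by omega) 2 (acc ++ [current]) rfl, IH _ (by omega) 2 [current] rfl]; simp
  · rw [IH _ (by omega) 4 (acc ++ [current]) rfl, IH _ (by omega) 4 [current] rfl]; simp
  · rw [IH _ (by omega) 8 (acc ++ [current]) rfl, IH _ (by omega) 8 [current] rfl]; simp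
  · simp
  · rw [IH _ (by omega) (current * 2) (acc ++ [current]) rfl,
        IH _ (by omega) (current * 2) [current] rfl]; simp
  · simp

-- halving the quotient drops the bit length by one
theorem pv_bitlen_halve (max_nodes c : Int) (h2 : 0 < c) (hle : c ≤ max_nodes) :
    PySem.Int.bitLength (PySem.Int.floordiv max_nodes c) =
      PySem.Int.bitLength (PySem.Int.floordiv max_nodes (c * 2)) + 1 := by
  obtain ⟨M, rfl⟩ : ∃ M : Nat, max_nodes = (M : Int) :=
    ⟨max_nodes.toNat, by omega⟩
  obtain ⟨C, rfl⟩ : ∃ C : Nat, c = (C : Int) := ⟨c.toNat, by omega⟩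
  have hC : 0 < C := by exact_mod_cast h2
  have hCM : C ≤ M := by exact_mod_cast hle
  have e1 : ((C : Int) * 2) = ((C * 2 : Nat) : Int) := by push_cast; ring
  rw [e1, PySem.Int.floordiv_natCast, PySem.Int.floordiv_natCast,
      ← Nat.div_div_eq_div_mul M C 2]
  exact PySem.Int.bitLength_natCast (Nat.one_le_div_iff hC |>.mpr hCM)

-- peeling the first element off the closed-form chain
theorem pv_range_map_shift (c : Int) (k : Nat) :
    (List.range (k + 1)).map (fun j => c * 2 ^ j) =
      c :: (List.range k).map (fun j => c * 2 * 2 ^ j) := by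
  rw [List.range_succ_eq_map, List.map_cons, List.map_map]
  refine congrArg₂ _ (by simp) (List.map_congr_left ?_)
  intro j _
  simp [Function.comp, pow_succ]
  ring

-- one unfolding of A's loop: for c in {2,4} ∪ [8,∞) the successor state is exactly 2c
theorem pyALoop_step (max_nodes c : Int) (hc : c = 2 ∨ c = 4 ∨ 8 ≤ c)
    (hle : c ≤ max_nodes) :
    pyALoop max_nodes c [] =
      c :: (if c * 2 ≤ max_nodes then pyALoop max_nodes (c * 2) [] else []) := by
  rcases hc with rfl | rfl | h8
  · rw [pyALoop]
    rw [dif_pos hle]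
    norm_num
    rw [pyALoop_acc]
    by_cases h4 : (4:Int) ≤ max_nodes
    · rw [if_pos h4]; rfl
    · rw [if_neg h4]
      rw [pyALoop, dif_neg (by omega)]
      simp
  · rw [pyALoop]
    rw [dif_pos hle]
    norm_num
    rw [pyALoop_acc]
    by_cases h8' : (8:Int) ≤ max_nodes
    · rw [if_pos h8']; rfl
    · rw [if_neg h8']
      rw [pyALoop, dif_neg (by omega)]
      simp
  · rw [pyALoop]
    rw [dif_pos hle]
    rw [if_neg (by omega), if_neg (by omega), if_neg (by omega)]
    by_cases hdb : c * 2 ≤ max_nodes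
    · rw [if_neg (by omega), if_pos hdb, pyALoop_acc]
      rfl
    · rw [if_pos (by omega), if_neg hdb]
      rfl

theorem pv_floordiv_zero (max_nodes d : Int) (h0 : 0 ≤ max_nodes) (hlt : max_nodes < d) :
    PySem.Int.floordiv max_nodes d = 0 := by
  rw [PySem.Int.floordiv_eq_iff_of_pos (by omega)]
  constructor <;> omega

-- from any chain state c in {2,4} ∪ [8,∞) with c ≤ max, A's loop yields the closed form
theorem pyALoop_chain (max_nodes c : Int) (hc : c = 2 ∨ c = 4 ∨ 8 ≤ c)
    (hle : c ≤ max_nodes) :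
    pyALoop max_nodes c [] =
      (List.range (PySem.Int.bitLength (PySem.Int.floordiv max_nodes c))).map
        (fun j => c * 2 ^ j) := by
  induction hn : (max_nodes + 1 - c).toNat using Nat.strong_induction_on
    generalizing c with
  | _ n IH =>
  have hpos : (0:Int) < c := by rcases hc with h | h | h <;> omega
  rw [pyALoop_step max_nodes c hc hle,
      pv_bitlen_halve max_nodes c hpos hle, pv_range_map_shift]
  by_cases hdb : c * 2 ≤ max_nodes
  · rw [if_pos hdb,
        IH _ (by omega) (c * 2) (by rcases hc with h | h | h <;> omega) hdb rfl]
  · rw [if_neg hdb, pv_floordiv_zero max_nodes (c * 2) (by omega) (by omega)]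
    simp [show PySem.Int.bitLength 0 = 0 by decide]

theorem main_equiv (min_nodes max_nodes : Int) :
    generate_node_options_py min_nodes max_nodes =
      generate_node_options_py_alt min_nodes max_nodes := by
  unfold generate_node_options_py generate_node_options_py_alt
  by_cases hgt : min_nodes > max_nodes
  · rw [if_pos hgt, pyALoop, dif_neg (by omega)]
  · rw [if_neg hgt]
    have hle : min_nodes ≤ max_nodes := by omega
    set start : Int :=
      if min_nodes < 2 then 2 else if min_nodes < 4 then 4
      else if min_nodes < 8 then 8 else 2 * min_nodes with hstart
    have hset : start = 2 ∨ start = 4 ∨ 8 ≤ start := by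
      rw [hstart]; split_ifs <;> omega
    have hunf : pyALoop max_nodes min_nodes [] =
        min_nodes :: (if start ≤ max_nodes then pyALoop max_nodes start [] else []) := by
      rw [pyALoop, dif_pos hle]
      rw [hstart]
      by_cases h2 : min_nodes < 2
      · rw [if_pos h2, if_pos h2, pyALoop_acc]
        by_cases hs : (2:Int) ≤ max_nodes
        · rw [if_pos hs]; rfl
        · rw [if_neg hs, pyALoop, dif_neg (by omega)]; simp
      · rw [if_neg h2, if_neg h2]
        by_cases h4 : min_nodes < 4
        · rw [if_pos h4, if_pos h4, pyALoop_acc]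
          by_cases hs : (4:Int) ≤ max_nodes
          · rw [if_pos hs]; rfl
          · rw [if_neg hs, pyALoop, dif_neg (by omega)]; simp
        · rw [if_neg h4, if_neg h4]
          by_cases h8 : min_nodes < 8
          · rw [if_pos h8, if_pos h8, pyALoop_acc]
            by_cases hs : (8:Int) ≤ max_nodes
            · rw [if_pos hs]; rfl
            · rw [if_neg hs, pyALoop, dif_neg (by omega)]; simp
          · rw [if_neg h8, if_neg h8]
            by_cases hs : 2 * min_nodes ≤ max_nodes
            · rw [if_pos hs, if_neg (by omega), pyALoop_acc]
              rw [show min_nodes * 2 = 2 * min_nodes by ring]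
              rfl
            · rw [if_neg hs, if_pos (by omega)]
              rfl
    rw [hunf]
    by_cases hs : start ≤ max_nodes
    · rw [if_pos hs, if_neg (by omega)]
      simp only []
      rw [pyALoop_chain max_nodes start hset hs]
    · rw [if_neg hs, if_pos (by omega)]

-- ===== VERDICT (by name: the statement is the Claim_ definition above) =====
theorem generate_node_options_py_spec : Claim_equal_generate_node_options_py := by
  intro min_nodes max_nodes _
  unfold Spec_generate_node_options_py
  exact main_equiv min_nodes max_nodes
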